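-- pv_equiv track=rewrite | github.com/ImaneBenb/Projet_SOAR | module/data_analyser.py | calculate_suspicion_score
-- ===== SOURCE A (Python) =====
-- def calculate_suspicion_score(ip_addresses_SSH, ip_addresses_HTTP, ip_addresses_HTTP_bots):
--
--     suspicion_scores = {}
--
--     # Rassembler toutes les IPs uniques
--     all_ips = set(ip_addresses_SSH.keys()) | set(ip_addresses_HTTP.keys()) | set(ip_addresses_HTTP_bots.keys())
--
--     # Définir des seuils pour chaque type d'activité suspecte
--     ssh_threshold=50
--     http_404_threshold=10
--     bot_threshold=10
--
--     for ip in all_ips: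
--         highly_suspect = False
--         # Récupérer les occurrences pour chaque type d'activité
--         ssh_failures = ip_addresses_SSH.get(ip, 0)
--         http_404s = ip_addresses_HTTP.get(ip, 0)
--         bot_requests = ip_addresses_HTTP_bots.get(ip, 0)
--
--         # Ajouter au score basé sur les seuils
--         if ssh_failures >= ssh_threshold:
--             highly_suspect = True
--         if http_404s >= http_404_threshold and bot_requests >= bot_threshold:
--             highly_suspect = True
--
--         suspicion_scores[ip] = {
--             'ssh_failures': ssh_failures,
--             'http_404s': http_404s,
--             'bot_requests': bot_requests
--         }
--
--     return suspicion_scores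
-- ===== SOURCE B (Python) =====
-- def calculate_suspicion_score(ip_addresses_SSH, ip_addresses_HTTP, ip_addresses_HTTP_bots):
--     suspicion_scores = {}
--     for ip, count in ip_addresses_SSH.items():
--         suspicion_scores.setdefault(ip, {'ssh_failures': 0, 'http_404s': 0, 'bot_requests': 0})['ssh_failures'] = count
--     for ip, count in ip_addresses_HTTP.items():
--         suspicion_scores.setdefault(ip, {'ssh_failures': 0, 'http_404s': 0, 'bot_requests': 0})['http_404s'] = count
--     for ip, count in ip_addresses_HTTP_bots.items():
--         suspicion_scores.setdefault(ip, {'ssh_failures': 0, 'http_404s': 0, 'bot_requests': 0})['bot_requests'] = count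
--     return suspicion_scores
-- ===== Notes on version B (the rewrite author's own statement) =====
-- stated objective: simpler
-- what changed: Drops the dead highly_suspect logic and the precomputed key-set union; instead each of the three source dicts is scattered into the result in its own pass via setdefault, so no per-IP triple lookup and no set union is needed.
import Mathlib
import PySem

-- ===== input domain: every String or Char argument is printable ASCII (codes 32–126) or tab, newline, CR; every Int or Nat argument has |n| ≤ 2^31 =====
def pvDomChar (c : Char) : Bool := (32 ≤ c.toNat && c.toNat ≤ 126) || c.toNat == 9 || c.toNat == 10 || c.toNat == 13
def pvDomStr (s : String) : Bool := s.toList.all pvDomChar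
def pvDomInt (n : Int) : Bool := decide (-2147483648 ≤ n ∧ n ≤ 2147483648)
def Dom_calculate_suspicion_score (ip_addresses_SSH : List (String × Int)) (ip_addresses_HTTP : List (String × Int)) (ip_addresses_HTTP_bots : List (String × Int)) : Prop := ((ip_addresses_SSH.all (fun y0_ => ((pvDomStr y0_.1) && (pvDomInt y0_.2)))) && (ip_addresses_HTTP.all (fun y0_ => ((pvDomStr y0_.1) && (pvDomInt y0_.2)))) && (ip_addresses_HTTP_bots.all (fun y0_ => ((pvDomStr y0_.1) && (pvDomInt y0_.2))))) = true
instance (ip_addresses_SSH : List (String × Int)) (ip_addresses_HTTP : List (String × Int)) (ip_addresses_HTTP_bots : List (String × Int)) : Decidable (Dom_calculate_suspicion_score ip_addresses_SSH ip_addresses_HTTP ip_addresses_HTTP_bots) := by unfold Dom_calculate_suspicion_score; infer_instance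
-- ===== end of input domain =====

-- B drops the dead highly_suspect logic and the key-set union: three source-driven setdefault passes build the same score dict (simpler decomposition).


-- ===== PORT A =====
def calculate_suspicion_score (ip_addresses_SSH : List (String × Int)) (ip_addresses_HTTP : List (String × Int)) (ip_addresses_HTTP_bots : List (String × Int)) : List (String × List (String × Int)) :=
  let suspicion_scores : PySem.Dict String (PySem.Dict String Int) := PySem.Dict.empty
  let all_ips : PySem.Set String :=
    PySem.Set.union (PySem.Set.union (PySem.Set.ofList (ip_addresses_SSH.map Prod.fst))
      (PySem.Set.ofList (ip_addresses_HTTP.map Prod.fst))) (PySem.Set.ofList (ip_addresses_HTTP_bots.map Prod.fst))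
  let result := all_ips.foldl (fun scores ip =>
    let highly_suspect := false
    let ssh_failures := (PySem.Dict.mk ip_addresses_SSH).getD ip 0
    let http_404s := (PySem.Dict.mk ip_addresses_HTTP).getD ip 0
    let bot_requests := (PySem.Dict.mk ip_addresses_HTTP_bots).getD ip 0
    let highly_suspect := if 50 ≤ ssh_failures then true else highly_suspect
    let highly_suspect := if 10 ≤ http_404s ∧ 10 ≤ bot_requests then true else highly_suspect
    let _ := highly_suspect
    scores.insert ip (PySem.Dict.ofList [("ssh_failures", ssh_failures), ("http_404s", http_404s), ("bot_requests", bot_requests)])) suspicion_scores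
  result.items.map (fun p => (p.1, p.2.items))

-- ===== PORT B =====
def pvDefaultRecord : PySem.Dict String Int :=
  PySem.Dict.ofList [("ssh_failures", 0), ("http_404s", 0), ("bot_requests", 0)]

-- scores.setdefault(ip, fresh default record)[field] = count
def pvSetField (scores : PySem.Dict String (PySem.Dict String Int)) (ip field : String) (count : Int) : PySem.Dict String (PySem.Dict String Int) :=
  (scores.setdefault ip pvDefaultRecord).modify ip pvDefaultRecord (fun r => r.insert field count)

def calculate_suspicion_score_alt (ip_addresses_SSH : List (String × Int)) (ip_addresses_HTTP : List (String × Int)) (ip_addresses_HTTP_bots : List (String × Int)) : List (String × List (String × Int)) :=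
  let suspicion_scores : PySem.Dict String (PySem.Dict String Int) := PySem.Dict.empty
  let suspicion_scores := ip_addresses_SSH.foldl (fun sc p => pvSetField sc p.1 "ssh_failures" p.2) suspicion_scores
  let suspicion_scores := ip_addresses_HTTP.foldl (fun sc p => pvSetField sc p.1 "http_404s" p.2) suspicion_scores
  let suspicion_scores := ip_addresses_HTTP_bots.foldl (fun sc p => pvSetField sc p.1 "bot_requests" p.2) suspicion_scores
  suspicion_scores.items.map (fun p => (p.1, p.2.items))

-- ===== PRECONDITION & SPEC =====
-- The Python arguments are dicts, whose key sequences are duplicate-free by construction; Pre_ excludes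
-- association lists with duplicate keys, which represent no Python dict (there A's first-match get vs B's
-- last-write assignment would disagree accidentally).
-- Boolean "the key column is duplicate-free": deduplicating the keys changes nothing
def pvNodupKeys (l : List (String × Int)) : Bool :=
  PySem.Set.ofList (l.map Prod.fst) == l.map Prod.fst
def Pre_calculate_suspicion_score (ip_addresses_SSH : List (String × Int)) (ip_addresses_HTTP : List (String × Int)) (ip_addresses_HTTP_bots : List (String × Int)) : Prop :=
  (pvNodupKeys ip_addresses_SSH && pvNodupKeys ip_addresses_HTTP && pvNodupKeys ip_addresses_HTTP_bots) = true
instance (ip_addresses_SSH : List (String × Int)) (ip_addresses_HTTP : List (String × Int)) (ip_addresses_HTTP_bots : List (String × Int)) : Decidable (Pre_calculate_suspicion_score ip_addresses_SSH ip_addresses_HTTP ip_addresses_HTTP_bots) := by unfold Pre_calculate_suspicion_score; infer_instance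

def pvWitness_calculate_suspicion_score : (List (String × Int)) × (List (String × Int)) × (List (String × Int)) :=
  ([("1.2.3.4", 60), ("9.9.9.9", 1)], [("9.9.9.9", 12), ("5.6.7.8", 3)], [("5.6.7.8", 11)])

def Spec_calculate_suspicion_score (ip_addresses_SSH : List (String × Int)) (ip_addresses_HTTP : List (String × Int)) (ip_addresses_HTTP_bots : List (String × Int)) (out : List (String × List (String × Int))) : Prop := out = calculate_suspicion_score_alt ip_addresses_SSH ip_addresses_HTTP ip_addresses_HTTP_bots
instance (ip_addresses_SSH : List (String × Int)) (ip_addresses_HTTP : List (String × Int)) (ip_addresses_HTTP_bots : List (String × Int)) (out : List (String × List (String × Int))) : Decidable (Spec_calculate_suspicion_score ip_addresses_SSH ip_addresses_HTTP ip_addresses_HTTP_bots out) := by unfold Spec_calculate_suspicion_score; infer_instance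

-- ===== CLAIM (what is proved, stated in full; the proofs are below) =====
def Claim_equal_calculate_suspicion_score : Prop := ∀ (ip_addresses_SSH : List (String × Int)) (ip_addresses_HTTP : List (String × Int)) (ip_addresses_HTTP_bots : List (String × Int)), Dom_calculate_suspicion_score ip_addresses_SSH ip_addresses_HTTP ip_addresses_HTTP_bots → Pre_calculate_suspicion_score ip_addresses_SSH ip_addresses_HTTP ip_addresses_HTTP_bots → Spec_calculate_suspicion_score ip_addresses_SSH ip_addresses_HTTP ip_addresses_HTTP_bots (calculate_suspicion_score ip_addresses_SSH ip_addresses_HTTP ip_addresses_HTTP_bots)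

-- ===== LEMMAS AND PROOFS =====

-- the record both programs end up storing for key k
def pvRec (sshL httpL botL : List (String × Int)) (k : String) : PySem.Dict String Int :=
  PySem.Dict.ofList [("ssh_failures", (PySem.Dict.mk sshL).getD k 0),
                     ("http_404s", (PySem.Dict.mk httpL).getD k 0),
                     ("bot_requests", (PySem.Dict.mk botL).getD k 0)]

-- a dict with nodup keys is its key list paired with its lookups
theorem pv_items_eq_map_keys {κ ν : Type} [BEq κ] [LawfulBEq κ] (d : PySem.Dict κ ν) (v0 : ν)
    (h : d.keys.Nodup) : d.items = d.keys.map (fun k => (k, d.getD k v0)) := by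
  obtain ⟨its⟩ := d
  induction its with
  | nil => rfl
  | cons p rest ih =>
    obtain ⟨k0, w0⟩ := p
    simp only [PySem.Dict.keys] at h ih ⊢
    simp only [List.map_cons, List.nodup_cons] at h ⊢
    obtain ⟨hk0, hrest⟩ := h
    refine List.cons_eq_cons.mpr ⟨?_, ?_⟩
    · simp [PySem.Dict.getD_eq_get?_getD, PySem.Dict.get?_mk_cons]
    · have tail : (rest.map (fun x => x.1)).map
            (fun k => (k, (PySem.Dict.mk ((k0, w0) :: rest)).getD k v0))
          = (rest.map (fun x => x.1)).map (fun k => (k, (PySem.Dict.mk rest).getD k v0)) := by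
        apply List.map_congr_left
        intro k hkmem
        have hne : k0 ≠ k := by rintro rfl; exact hk0 hkmem
        simp [PySem.Dict.getD_eq_get?_getD, PySem.Dict.get?_mk_cons, hne]
      rw [tail]
      exact ih hrest

-- A's fold: inserting fresh distinct keys appends the mapped records
theorem pv_foldl_insert_items {κ ν : Type} [BEq κ] [LawfulBEq κ] [DecidableEq κ] (f : κ → ν) :
    ∀ (ips : List κ) (d : PySem.Dict κ ν), (ips ++ d.keys).Nodup →
      (ips.foldl (fun sc ip => sc.insert ip (f ip)) d).items = d.items ++ ips.map (fun ip => (ip, f ip)) := by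
  intro ips
  induction ips with
  | nil => intro d _; simp
  | cons x ips ih =>
    intro d h
    have hx : x ∉ d.keys := by
      simp only [List.cons_append, List.nodup_cons, List.mem_append] at h
      exact fun hc => h.1 (Or.inr hc)
    have hc : d.contains x = false := by
      rw [PySem.Dict.contains_eq_decide_mem_keys]; simpa using hx
    have hkeys : (d.insert x (f x)).keys = d.keys ++ [x] :=
      PySem.Dict.keys_insert_of_not_contains d (f x) hc
    have hitems : (d.insert x (f x)).items = d.items ++ [(x, f x)] :=
      PySem.Dict.items_insert_of_not_contains d (f x) hc
    have hnd : (ips ++ (d.insert x (f x)).keys).Nodup := by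
      rw [hkeys]
      have hperm : (ips ++ (d.keys ++ [x])).Perm ((x :: ips) ++ d.keys) := by
        rw [← List.append_assoc, List.cons_append]
        exact List.perm_append_singleton x (ips ++ d.keys)
      exact hperm.symm.nodup h
    simp only [List.foldl_cons]
    rw [ih (d.insert x (f x)) hnd, hitems, List.map_cons]
    simp

theorem pv_keys_setField (d : PySem.Dict String (PySem.Dict String Int)) (k field : String) (n : Int) :
    (pvSetField d k field n).keys = PySem.Set.add d.keys k := by
  unfold pvSetField PySem.Dict.modify
  rw [PySem.Set.add_eq_ite]
  by_cases hc : d.contains k = true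
  · have hmem : k ∈ d.keys := by
      rw [PySem.Dict.contains_eq_decide_mem_keys] at hc; simpa using hc
    rw [PySem.Dict.setdefault_of_contains d pvDefaultRecord hc,
        PySem.Dict.keys_insert_of_contains d _ hc, if_pos hmem]
  · have hc' : d.contains k = false := by simpa using hc
    have hmem : k ∉ d.keys := by
      rw [PySem.Dict.contains_eq_decide_mem_keys] at hc'; simpa using hc'
    rw [PySem.Dict.setdefault_of_not_contains d pvDefaultRecord hc',
        PySem.Dict.keys_insert_of_contains _ _ (PySem.Dict.contains_insert_self d k _),
        PySem.Dict.keys_insert_of_not_contains d _ hc', if_neg hmem]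

theorem pv_getq_setField (d : PySem.Dict String (PySem.Dict String Int)) (k field : String) (n : Int) (k' : String) :
    (pvSetField d k field n).get? k' =
      if k' = k then some (((d.get? k).getD pvDefaultRecord).insert field n) else d.get? k' := by
  unfold pvSetField PySem.Dict.modify
  by_cases hc : d.contains k = true
  · rw [PySem.Dict.setdefault_of_contains d pvDefaultRecord hc, PySem.Dict.get?_insert,
        PySem.Dict.getD_eq_get?_getD]
  · have hc' : d.contains k = false := by simpa using hc
    have hnone : d.get? k = none := (PySem.Dict.get?_eq_none_iff_contains d k).mpr hc'
    rw [PySem.Dict.setdefault_of_not_contains d pvDefaultRecord hc', PySem.Dict.get?_insert, hnone]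
    split_ifs with he
    · subst he
      simp [PySem.Dict.getD_eq_get?_getD, PySem.Dict.get?_insert_self]
    · exact PySem.Dict.get?_insert_of_ne d pvDefaultRecord he

theorem pv_keys_pass (field : String) :
    ∀ (l : List (String × Int)) (d : PySem.Dict String (PySem.Dict String Int)),
      (l.foldl (fun sc p => pvSetField sc p.1 field p.2) d).keys = PySem.Set.update d.keys (l.map Prod.fst) := by
  intro l
  induction l with
  | nil => intro d; simp [PySem.Set.update]
  | cons p rest ih =>
    intro d
    simp only [List.foldl_cons, List.map_cons]
    rw [ih, pv_keys_setField, PySem.Set.update_cons]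

-- one whole pass of B, lookup side (keys of l nodup)
theorem pv_getq_pass (field : String) :
    ∀ (l : List (String × Int)) (d : PySem.Dict String (PySem.Dict String Int)),
      (l.map Prod.fst).Nodup → ∀ k,
      (l.foldl (fun sc p => pvSetField sc p.1 field p.2) d).get? k =
        match (PySem.Dict.mk l).get? k with
        | some n => some (((d.get? k).getD pvDefaultRecord).insert field n)
        | none => d.get? k := by
  intro l
  induction l with
  | nil => intro d _ k; rfl
  | cons p rest ih =>
    intro d hnd k
    obtain ⟨k0, n0⟩ := p
    simp only [List.map_cons, List.nodup_cons] at hnd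
    obtain ⟨hk0, hrest⟩ := hnd
    simp only [List.foldl_cons]
    rw [ih _ hrest k, PySem.Dict.get?_mk_cons]
    by_cases he : k = k0
    · subst he
      have hnone : (PySem.Dict.mk rest).get? k = none := by
        rw [PySem.Dict.get?_eq_none_iff_not_mem_keys]
        simpa [PySem.Dict.keys] using hk0
      simp [hnone, pv_getq_setField]
    · have hbe : (k0 == k) = false := by simp [Ne.symm he]
      simp [hbe, pv_getq_setField, he]

-- set(a)|set(b) updates by the underlying list: dedup inside the update is harmless
theorem pv_update_ofList {α : Type} [BEq α] [LawfulBEq α] (x : PySem.Set α) (l : List α) :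
    PySem.Set.update x (PySem.Set.ofList l) = PySem.Set.update x l := by
  rw [PySem.Set.update_eq_append_filter, PySem.Set.update_eq_append_filter, PySem.Set.ofList_ofList]

-- ===== VERDICT (by name: the statement is the Claim_ definition above) =====
theorem calculate_suspicion_score_spec : Claim_equal_calculate_suspicion_score := by
  intro s h b _ hpre
  have toNodup : ∀ l : List (String × Int), pvNodupKeys l = true → (l.map Prod.fst).Nodup := by
    intro l hl
    unfold pvNodupKeys at hl
    rw [← eq_of_beq hl]
    exact PySem.Set.nodup_ofList _
  unfold Pre_calculate_suspicion_score at hpre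
  simp only [Bool.and_eq_true] at hpre
  obtain ⟨⟨hs', hh'⟩, hb'⟩ := hpre
  have hs := toNodup s hs'
  have hh := toNodup h hh'
  have hb := toNodup b hb'
  unfold Spec_calculate_suspicion_score
  set K : PySem.Set String :=
    PySem.Set.update (PySem.Set.update (PySem.Set.ofList (s.map Prod.fst)) (h.map Prod.fst)) (b.map Prod.fst) with hK
  have hKnodup : K.Nodup := by
    rw [hK]
    exact PySem.Set.nodup_update _ _ (PySem.Set.nodup_update _ _ (PySem.Set.nodup_ofList _))
  -- A's key-set union equals K
  have hipsK : PySem.Set.union (PySem.Set.union (PySem.Set.ofList (s.map Prod.fst)) (PySem.Set.ofList (h.map Prod.fst))) (PySem.Set.ofList (b.map Prod.fst)) = K := by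
    show PySem.Set.update (PySem.Set.update (PySem.Set.ofList (s.map Prod.fst)) (PySem.Set.ofList (h.map Prod.fst))) (PySem.Set.ofList (b.map Prod.fst)) = K
    rw [pv_update_ofList, pv_update_ofList, hK]
  -- A unfolded
  have hA : calculate_suspicion_score s h b =
      ((PySem.Set.union (PySem.Set.union (PySem.Set.ofList (s.map Prod.fst)) (PySem.Set.ofList (h.map Prod.fst))) (PySem.Set.ofList (b.map Prod.fst))).foldl
        (fun sc ip => sc.insert ip (pvRec s h b ip)) (PySem.Dict.empty : PySem.Dict String (PySem.Dict String Int))).items.map (fun p => (p.1, p.2.items)) := rfl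
  have hAitems : ((K : List String).foldl (fun sc ip => sc.insert ip (pvRec s h b ip)) (PySem.Dict.empty : PySem.Dict String (PySem.Dict String Int))).items
      = K.map (fun ip => (ip, pvRec s h b ip)) := by
    have hnd : ((K : List String) ++ (PySem.Dict.empty : PySem.Dict String (PySem.Dict String Int)).keys).Nodup := by
      rw [PySem.Dict.keys_empty, List.append_nil]; exact hKnodup
    rw [pv_foldl_insert_items (pvRec s h b) K PySem.Dict.empty hnd]
    rfl
  -- B unfolded, pass by pass
  set d1 := s.foldl (fun sc p => pvSetField sc p.1 "ssh_failures" p.2) (PySem.Dict.empty : PySem.Dict String (PySem.Dict String Int)) with hd1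
  set d2 := h.foldl (fun sc p => pvSetField sc p.1 "http_404s" p.2) d1 with hd2
  set d3 := b.foldl (fun sc p => pvSetField sc p.1 "bot_requests" p.2) d2 with hd3
  have hB : calculate_suspicion_score_alt s h b = d3.items.map (fun p => (p.1, p.2.items)) := by
    rw [hd3, hd2, hd1]; rfl
  have hk1 : d1.keys = PySem.Set.ofList (s.map Prod.fst) := by
    rw [hd1, pv_keys_pass, PySem.Dict.keys_empty, PySem.Set.update_nil_left]
  have hk3 : d3.keys = K := by
    rw [hd3, pv_keys_pass, hd2, pv_keys_pass, hk1, hK]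
  have hval : ∀ k, d3.getD k pvDefaultRecord = pvRec s h b k := by
    intro k
    rw [PySem.Dict.getD_eq_get?_getD, hd3, pv_getq_pass "bot_requests" b d2 hb k, hd2,
        pv_getq_pass "http_404s" h d1 hh k, hd1,
        pv_getq_pass "ssh_failures" s PySem.Dict.empty hs k, PySem.Dict.get?_empty]
    rcases hsv : (PySem.Dict.mk s).get? k with _ | a <;>
      rcases hhv : (PySem.Dict.mk h).get? k with _ | a2 <;>
      rcases hbv : (PySem.Dict.mk b).get? k with _ | a3 <;>
      · simp only [pvRec, PySem.Dict.getD_eq_get?_getD, hsv, hhv, hbv]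
        rfl
  have hBitems : d3.items = K.map (fun k => (k, pvRec s h b k)) := by
    rw [pv_items_eq_map_keys d3 pvDefaultRecord (by rw [hk3]; exact hKnodup), hk3]
    exact List.map_congr_left fun k _ => by rw [hval k]
  rw [hA, hipsK, hAitems, hB, hBitems]
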